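-- pv_equiv track=rewrite | github.com/BenGOsborn/problems | hacker-rank/NAB.py | solution
-- ===== SOURCE A (Python) =====
-- def solution(S):
--     if S == "":
--         return S
--
--     array = [char for char in S]
--
--     left = 0
--     right = len(S) - 1
--
--     while left <= right:
--         if left == right:
--             if array[left] == "?":
--                 array[left] = "a"
--         elif array[left] == "?" and array[right] == "?":
--             array[left] = "a"
--             array[right] = "a"
--         elif array[left] == "?":
--             array[left] = array[right]
--         elif array[right] == "?":
--             array[right] = array[left]
--         else:
--             if array[left] != array[right]:
--                 return "NO"
--
--         left += 1
--         right -= 1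
--
--     return "".join(array)
-- ===== SOURCE B (Python) =====
-- def solution(S):
--     # Unify S elementwise with its own reverse: zip the string with reversed(S)
--     # and merge each aligned pair of characters into one.
--     out = []
--     for c, d in zip(S, reversed(S)):
--         if c == "?":
--             out.append("a" if d == "?" else d)
--         elif d == "?" or c == d:
--             out.append(c)
--         else:
--             return "NO"
--     return "".join(out)
-- ===== Notes on version B (the rewrite author's own statement) =====
-- stated objective: idiomatic
-- what changed: B zips the string with its own reverse and elementwise unifies each aligned character pair ('?' yields to the partner, '?'/'?' becomes 'a', a clash returns NO), eliminating A's two-pointer index arithmetic, in-place array mutation, middle-element special case and half-length loop.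
import Mathlib
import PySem

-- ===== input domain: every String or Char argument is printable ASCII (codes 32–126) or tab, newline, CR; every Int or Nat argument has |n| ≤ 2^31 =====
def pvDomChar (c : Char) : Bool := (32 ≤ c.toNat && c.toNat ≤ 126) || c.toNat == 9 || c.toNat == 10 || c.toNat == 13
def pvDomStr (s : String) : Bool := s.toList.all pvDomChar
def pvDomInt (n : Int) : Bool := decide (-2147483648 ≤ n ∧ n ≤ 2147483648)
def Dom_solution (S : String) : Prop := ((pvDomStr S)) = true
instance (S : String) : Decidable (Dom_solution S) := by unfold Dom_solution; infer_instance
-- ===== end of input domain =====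

-- B zips the string with its own reverse and unifies each aligned character pair,
-- replacing A's two-pointer in-place mutation loop (objective: idiomatic).

-- ===== PORT A =====
-- the while loop: mutates `array` at positions `left`/`right`; `none` = the "NO" early return
def solutionLoop (arr : List Char) (left right : Nat) : Option (List Char) :=
  if _h : left ≤ right then
    if left = right then
      solutionLoop (if arr.getD left ' ' = '?' then arr.set left 'a' else arr) (left + 1) (right - 1)
    else if arr.getD left ' ' = '?' ∧ arr.getD right ' ' = '?' then
      solutionLoop ((arr.set left 'a').set right 'a') (left + 1) (right - 1)
    else if arr.getD left ' ' = '?' then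
      solutionLoop (arr.set left (arr.getD right ' ')) (left + 1) (right - 1)
    else if arr.getD right ' ' = '?' then
      solutionLoop (arr.set right (arr.getD left ' ')) (left + 1) (right - 1)
    else if arr.getD left ' ' ≠ arr.getD right ' ' then none
    else solutionLoop arr (left + 1) (right - 1)
  else some arr
termination_by right + 1 - left
decreasing_by all_goals omega

def solution (S : String) : String :=
  if S = "" then S
  else
    match solutionLoop S.toList 0 (S.length - 1) with
    | none => "NO"
    | some arr => String.mk arr

-- ===== PORT B =====
-- the for-loop over zip(S, reversed(S)): builds the output, `none` = the "NO" early return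
def unifyLoop : List (Char × Char) → Option (List Char)
  | [] => some []
  | (c, d) :: rest =>
    if c = '?' then (unifyLoop rest).map (fun t => (if d = '?' then 'a' else d) :: t)
    else if d = '?' ∨ c = d then (unifyLoop rest).map (fun t => c :: t)
    else none

def solution_alt (S : String) : String :=
  match unifyLoop (S.toList.zip S.toList.reverse) with
  | some out => String.mk out
  | none => "NO"

-- ===== PRECONDITION & SPEC =====
def Spec_solution (S : String) (out : String) : Prop := out = solution_alt S
instance (S : String) (out : String) : Decidable (Spec_solution S out) := by unfold Spec_solution; infer_instance

-- ===== CLAIM (what is proved, stated in full; the proofs are below) =====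
def Claim_equal_solution : Prop := ∀ (S : String), Dom_solution S → Spec_solution S (solution S)

-- ===== LEMMAS AND PROOFS =====

-- pair-level view of B's branches
def pairOk (p : Char × Char) : Bool :=
  decide (¬ (p.1 ≠ '?' ∧ p.2 ≠ '?' ∧ p.1 ≠ p.2))

def pairFill (p : Char × Char) : Char :=
  if p.1 ≠ '?' then p.1 else if p.2 ≠ '?' then p.2 else 'a'

lemma unifyLoop_eq (ps : List (Char × Char)) :
    unifyLoop ps = if ps.all pairOk then some (ps.map pairFill) else none := by
  induction ps with
  | nil => rfl
  | cons p rest ih =>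
    obtain ⟨c, d⟩ := p
    rw [unifyLoop, ih]
    by_cases hc : c = '?'
    · subst hc
      have hok : pairOk ('?', d) = true := by simp [pairOk]
      by_cases hall : rest.all pairOk = true
      · simp only [List.all_cons, hall, hok, if_pos rfl, Bool.and_self, if_pos]
        simp [pairFill]
      · simp [hall, hok]
    · by_cases hd : d = '?' ∨ c = d
      · have hok : pairOk (c, d) = true := by
          simp only [pairOk, decide_eq_true_eq]
          rcases hd with rfl | rfl <;> tauto
        by_cases hall : rest.all pairOk = true
        · simp only [if_neg hc, if_pos hd, List.all_cons, hok, hall, Bool.and_self, if_pos]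
          simp [pairFill, hc]
        · simp [hc, hd, hall, hok]
      · have hok : pairOk (c, d) = false := by
          push_neg at hd
          simp only [pairOk, decide_eq_false_iff_not, not_not]
          exact ⟨hc, hd.1, hd.2⟩
        simp [hc, hd, hok]

-- index-level view of A's loop (used by loop_spec below)
def okB (s : List Char) (i : Nat) : Bool :=
  decide (¬ (s.getD i ' ' ≠ '?' ∧ s.getD (s.length - 1 - i) ' ' ≠ '?' ∧
             s.getD i ' ' ≠ s.getD (s.length - 1 - i) ' '))

def fillB (s : List Char) (i : Nat) : Char :=
  if s.getD i ' ' ≠ '?' then s.getD i ' '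
  else if s.getD (s.length - 1 - i) ' ' ≠ '?' then s.getD (s.length - 1 - i) ' '
  else 'a'

lemma getD_eq_getElem (s : List Char) (i : Nat) (hi : i < s.length) :
    s.getD i ' ' = s[i] := by
  simp [List.getD, List.getElem?_eq_getElem hi]

lemma okB_getElem (s : List Char) (i : Nat) (hi : i < s.length) :
    okB s i = pairOk (s[i], s[s.length - 1 - i]'(by omega)) := by
  simp only [okB, pairOk, getD_eq_getElem s i hi,
    getD_eq_getElem s (s.length - 1 - i) (by omega)]

lemma fillB_getElem (s : List Char) (i : Nat) (hi : i < s.length) :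
    fillB s i = pairFill (s[i], s[s.length - 1 - i]'(by omega)) := by
  simp only [fillB, pairFill, getD_eq_getElem s i hi,
    getD_eq_getElem s (s.length - 1 - i) (by omega)]

lemma getD_set (xs : List Char) (i j : Nat) (a : Char) :
    (xs.set i a).getD j ' ' = if i = j ∧ j < xs.length then a else xs.getD j ' ' := by
  simp only [List.getD, List.getElem?_set]
  rcases eq_or_ne i j with rfl | hne
  · by_cases hj : i < xs.length
    · simp [hj]
    · simp [hj, List.getElem?_eq_none (Nat.le_of_not_lt hj)]
  · simp [hne]

lemma okB_middle (s : List Char) (i : Nat) (h : s.length - 1 - i = i) : okB s i = true := by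
  simp only [okB, h, decide_eq_true_eq]
  exact fun hh => hh.2.2 rfl

lemma okB_symm (s : List Char) (i : Nat) (hi : i < s.length) :
    okB s (s.length - 1 - i) = okB s i := by
  have hj : s.length - 1 - (s.length - 1 - i) = i := by omega
  simp only [okB, hj]
  rw [decide_eq_decide]
  constructor <;> (intro hc h; exact hc ⟨h.2.1, h.1, fun e => h.2.2 e.symm⟩)

-- the window condition maintained by A's loop
def OkWin (s : List Char) (l r : Nat) : Prop := ∀ i, l ≤ i → i ≤ r → okB s i = true

lemma okWin_shrink (s : List Char) (l r : Nat) (hl : okB s l = true) (_hr : l ≤ r)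
    (h : OkWin s (l + 1) (r - 1)) (hsym : okB s r = okB s l) : OkWin s l r := by
  intro i h1 h2
  rcases eq_or_ne i l with rfl | hne1
  · exact hl
  rcases eq_or_ne i r with rfl | hne2
  · rw [hsym]; exact hl
  exact h i (by omega) (by omega)

-- main characterisation of A's loop
lemma loop_spec (s : List Char) : ∀ (k l r : Nat) (arr : List Char),
    r + 1 - l ≤ k →
    (l ≤ r → l + r + 1 = s.length) →
    arr.length = s.length →
    (∀ i, l ≤ i → i ≤ r → arr.getD i ' ' = s.getD i ' ') →
    (OkWin s l r →
      solutionLoop arr l r = some (arr.mapIdx fun i c => if l ≤ i ∧ i ≤ r then fillB s i else c)) ∧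
    (¬ OkWin s l r → solutionLoop arr l r = none) := by
  intro k
  induction k with
  | zero =>
    intro l r arr hk _ hlen _
    have hlr : ¬ l ≤ r := by omega
    have hwin : OkWin s l r := by intro i h1 h2; omega
    refine ⟨fun _ => ?_, fun hw => absurd hwin hw⟩
    rw [solutionLoop]
    simp only [hlr, dif_neg, not_false_iff]
    congr 1
    apply List.ext_getElem (by simp)
    intro i h1 h2
    simp only [List.getElem_mapIdx]
    rw [if_neg (by omega)]
  | succ k ih =>
    intro l r arr hk hlr hlen hagree
    by_cases h : l ≤ r
    case neg =>
      have hwin : OkWin s l r := by intro i h1 h2; omega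
      refine ⟨fun _ => ?_, fun hw => absurd hwin hw⟩
      rw [solutionLoop]
      simp only [h, dif_neg, not_false_iff]
      congr 1
      apply List.ext_getElem (by simp)
      intro i h1 h2
      simp only [List.getElem_mapIdx]
      rw [if_neg (by omega)]
    case pos =>
      have hn := hlr h
      have hrl : s.length - 1 - l = r := by omega
      have hrr : s.length - 1 - r = l := by omega
      have hlbound : l < s.length := by omega
      have hrbound : r < s.length := by omega
      have hal : arr.getD l ' ' = s.getD l ' ' := hagree l le_rfl h
      have har : arr.getD r ' ' = s.getD r ' ' := hagree r h le_rfl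
      have hsym : okB s r = okB s l := by rw [← hrl, okB_symm s l hlbound]
      have step : ∀ arr' : List Char, arr'.length = s.length →
          (∀ i, l + 1 ≤ i → i ≤ r - 1 → arr'.getD i ' ' = s.getD i ' ') →
          okB s l = true →
          (arr'.mapIdx fun i c => if l + 1 ≤ i ∧ i ≤ r - 1 then fillB s i else c)
            = (arr.mapIdx fun i c => if l ≤ i ∧ i ≤ r then fillB s i else c) →
          (OkWin s l r →
            solutionLoop arr' (l + 1) (r - 1)
              = some (arr.mapIdx fun i c => if l ≤ i ∧ i ≤ r then fillB s i else c)) ∧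
          (¬ OkWin s l r → solutionLoop arr' (l + 1) (r - 1) = none) := by
        intro arr' hlen' hagree' hokl hmap
        obtain ⟨ih1, ih2⟩ := ih (l + 1) (r - 1) arr' (by omega) (by intro hh; omega) hlen' hagree'
        constructor
        · intro hw
          rw [ih1 (fun i h1 h2 => hw i (by omega) (by omega)), hmap]
        · intro hw
          exact ih2 fun hc => hw (okWin_shrink s l r hokl h hc hsym)
      rw [solutionLoop]
      simp only [h, dif_pos]
      by_cases hmid : l = r
      · subst hmid
        rw [if_pos rfl]
        have hok : okB s l = true := okB_middle s l (by omega)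
        by_cases hq : arr.getD l ' ' = '?'
        · rw [if_pos hq]
          apply step _ (by simpa using hlen)
          · intro i h1 h2
            rw [getD_set, if_neg (by omega)]
            exact hagree i (by omega) (by omega)
          · exact hok
          · apply List.ext_getElem (by simp)
            intro i h1 h2
            simp only [List.getElem_mapIdx, List.getElem_set]
            rcases eq_or_ne l i with rfl | hne
            · rw [if_pos rfl, if_neg (by omega), if_pos ⟨le_rfl, le_rfl⟩]
              rw [hal] at hq
              simp only [fillB, hrl, hq]; simp
            · rw [if_neg hne, if_neg (by omega), if_neg (by omega)]
        · rw [if_neg hq]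
          apply step _ hlen
          · intro i h1 h2; omega
          · exact hok
          · apply List.ext_getElem (by simp)
            intro i h1 h2
            simp only [List.getElem_mapIdx]
            rcases eq_or_ne l i with rfl | hne
            · rw [if_neg (by omega), if_pos ⟨le_rfl, le_rfl⟩]
              rw [hal] at hq
              have : fillB s l = arr[l] := by
                simp only [fillB, if_pos hq]
                rw [← hal]
                simp [List.getD, List.getElem?_eq_getElem (by omega : l < arr.length)]
              rw [this]
            · rw [if_neg (by omega), if_neg (by omega)]
      · rw [if_neg hmid]
        have hgl : arr.getD l ' ' = arr[l]'(by omega) := by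
          simp [List.getD, List.getElem?_eq_getElem (by omega : l < arr.length)]
        have hgr : arr.getD r ' ' = arr[r]'(by omega) := by
          simp [List.getD, List.getElem?_eq_getElem (by omega : r < arr.length)]
        by_cases hq1 : arr.getD l ' ' = '?' <;> by_cases hq2 : arr.getD r ' ' = '?'
        · rw [if_pos ⟨hq1, hq2⟩]
          apply step _ (by simpa using hlen)
          · intro i h1 h2
            rw [getD_set, if_neg (by omega), getD_set, if_neg (by omega)]
            exact hagree i (by omega) (by omega)
          · rw [hal] at hq1
            simp only [okB, decide_eq_true_eq]
            exact fun hh => hh.1 hq1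
          · apply List.ext_getElem (by simp)
            intro i h1 h2
            simp only [List.getElem_mapIdx, List.getElem_set]
            rw [hal] at hq1; rw [har] at hq2
            rcases eq_or_ne r i with rfl | hner
            · rw [if_pos rfl, if_neg (by omega), if_pos ⟨by omega, le_rfl⟩]
              simp only [fillB, hrr, hrl, hq1, hq2]; simp
            · rw [if_neg hner]
              rcases eq_or_ne l i with rfl | hnel
              · rw [if_pos rfl, if_neg (by omega), if_pos ⟨le_rfl, by omega⟩]
                simp only [fillB, hrl, hrr, hq1, hq2]; simp
              · rw [if_neg hnel]
                by_cases hwin : l ≤ i ∧ i ≤ r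
                · rw [if_pos ⟨by omega, by omega⟩, if_pos hwin]
                · rw [if_neg (by omega), if_neg hwin]
        · rw [if_neg (by tauto), if_pos hq1]
          apply step _ (by simpa using hlen)
          · intro i h1 h2
            rw [getD_set, if_neg (by omega)]
            exact hagree i (by omega) (by omega)
          · rw [hal] at hq1
            simp only [okB, decide_eq_true_eq]
            exact fun hh => hh.1 hq1
          · apply List.ext_getElem (by simp)
            intro i h1 h2
            simp only [List.getElem_mapIdx, List.getElem_set]
            rw [hal] at hq1; rw [har] at hq2
            rcases eq_or_ne l i with rfl | hnel
            · rw [if_pos rfl, if_neg (by omega), if_pos ⟨le_rfl, by omega⟩]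
              rw [har]
              simp only [fillB, hrl, hq1]
              rw [if_neg (by simp), if_pos hq2]
            · rw [if_neg hnel]
              rcases eq_or_ne r i with rfl | hner
              · rw [if_neg (by omega), if_pos ⟨by omega, le_rfl⟩]
                have : fillB s r = arr[r]'(by omega) := by
                  simp only [fillB, if_pos hq2]
                  rw [← har, hgr]
                rw [this]
              · by_cases hwin : l ≤ i ∧ i ≤ r
                · rw [if_pos ⟨by omega, by omega⟩, if_pos hwin]
                · rw [if_neg (by omega), if_neg hwin]
        · rw [if_neg (by tauto), if_neg hq1, if_pos hq2]
          apply step _ (by simpa using hlen)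
          · intro i h1 h2
            rw [getD_set, if_neg (by omega)]
            exact hagree i (by omega) (by omega)
          · rw [har] at hq2
            simp only [okB, hrl, decide_eq_true_eq]
            exact fun hh => hh.2.1 hq2
          · apply List.ext_getElem (by simp)
            intro i h1 h2
            simp only [List.getElem_mapIdx, List.getElem_set]
            rw [hal] at hq1; rw [har] at hq2
            rcases eq_or_ne r i with rfl | hner
            · rw [if_pos rfl, if_neg (by omega), if_pos ⟨by omega, le_rfl⟩]
              rw [hal]
              simp only [fillB, hrr, hq2]
              rw [if_neg (by simp), if_pos hq1]
            · rw [if_neg hner]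
              rcases eq_or_ne l i with rfl | hnel
              · rw [if_neg (by omega), if_pos ⟨le_rfl, by omega⟩]
                have : fillB s l = arr[l]'(by omega) := by
                  simp only [fillB, if_pos hq1]
                  rw [← hal, hgl]
                rw [this]
              · by_cases hwin : l ≤ i ∧ i ≤ r
                · rw [if_pos ⟨by omega, by omega⟩, if_pos hwin]
                · rw [if_neg (by omega), if_neg hwin]
        · rw [if_neg (by tauto), if_neg hq1, if_neg hq2]
          rw [hal] at hq1; rw [har] at hq2
          by_cases hne : s.getD l ' ' = s.getD r ' '
          · rw [hal, har, if_neg (by simpa using hne)]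
            apply step _ hlen
            · intro i h1 h2; exact hagree i (by omega) (by omega)
            · simp only [okB, hrl, decide_eq_true_eq]
              exact fun hh => hh.2.2 hne
            · apply List.ext_getElem (by simp)
              intro i h1 h2
              simp only [List.getElem_mapIdx]
              rcases eq_or_ne l i with rfl | hnel
              · rw [if_neg (by omega), if_pos ⟨le_rfl, by omega⟩]
                simp only [fillB, if_pos hq1]
                rw [← hal, hgl]
              · rcases eq_or_ne r i with rfl | hner
                · rw [if_neg (by omega), if_pos ⟨by omega, le_rfl⟩]
                  simp only [fillB, if_pos hq2]
                  rw [← har, hgr]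
                · by_cases hwin : l ≤ i ∧ i ≤ r
                  · rw [if_pos ⟨by omega, by omega⟩, if_pos hwin]
                  · rw [if_neg (by omega), if_neg hwin]
          · rw [hal, har, if_pos (by simpa using hne)]
            refine ⟨fun hw => ?_, fun _ => rfl⟩
            have hok := hw l le_rfl h
            simp only [okB, hrl, decide_eq_true_eq] at hok
            exact absurd ⟨hq1, hq2, hne⟩ hok

-- B's full-length pair check equals A's window condition
lemma zip_all_iff_okWin (s : List Char) (hn : 0 < s.length) :
    ((s.zip s.reverse).all pairOk = true) ↔ OkWin s 0 (s.length - 1) := by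
  rw [List.all_eq_true]
  constructor
  · intro hall i _ h2
    have hi : i < s.length := by omega
    rw [okB_getElem s i hi]
    have hz : i < (s.zip s.reverse).length := by simp [List.length_zip]; omega
    have := hall _ (List.getElem_mem hz)
    simpa [List.getElem_zip, List.getElem_reverse] using this
  · intro hw p hp
    obtain ⟨i, hi, rfl⟩ := List.mem_iff_getElem.mp hp
    have hi' : i < s.length := by simp [List.length_zip] at hi; omega
    have := hw i (Nat.zero_le i) (by omega)
    rw [okB_getElem s i hi'] at this
    simpa [List.getElem_zip, List.getElem_reverse] using this

-- B's merged output equals A's filled array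
lemma zip_map_eq_mapIdx (s : List Char) :
    (s.zip s.reverse).map pairFill
      = s.mapIdx (fun i c => if 0 ≤ i ∧ i ≤ s.length - 1 then fillB s i else c) := by
  apply List.ext_getElem (by simp [List.length_zip])
  intro i h1 h2
  have hi : i < s.length := by simpa using h2
  simp only [List.getElem_map, List.getElem_mapIdx, List.getElem_zip, List.getElem_reverse]
  rw [if_pos ⟨Nat.zero_le i, by omega⟩, fillB_getElem s i hi]

-- ===== VERDICT (by name: the statement is the Claim_ definition above) =====
theorem solution_spec : Claim_equal_solution := by
  intro S _
  unfold Spec_solution solution solution_alt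
  by_cases hS : S = ""
  · subst hS; decide
  · rw [if_neg hS]
    have hne : S.toList ≠ [] := by
      intro hc
      have := congrArg String.ofList hc
      rw [String.ofList_toList] at this
      exact hS this
    have hn : 0 < S.toList.length := List.length_pos_iff.mpr hne
    have hlenS : S.length - 1 = S.toList.length - 1 := by rw [String.length_toList]
    obtain ⟨h1, h2⟩ := loop_spec S.toList (S.toList.length + 1) 0 (S.toList.length - 1)
      S.toList (by omega) (by intro _; omega) rfl (by intro i _ _; rfl)
    rw [hlenS, unifyLoop_eq]
    by_cases hok : OkWin S.toList 0 (S.toList.length - 1)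
    · rw [h1 hok, if_pos ((zip_all_iff_okWin S.toList hn).mpr hok)]
      show String.mk _ = String.mk _
      rw [zip_map_eq_mapIdx]
    · rw [h2 hok, if_neg (by
        intro hc
        exact hok ((zip_all_iff_okWin S.toList hn).mp hc))]
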